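-- pv_equiv track=rewrite | github.com/guialexis/WeightedMergeAlign | WeightedMergeAlign.py | seqtoind
-- ===== SOURCE A (Python) =====
-- def seqtoind(sequence):
--     """ Convert a sequence to a list of amino acid indices.
--         Gap are converted to the index of the preceeding amino acid. """
--
--     indices = []
--     i = 0
--
--     for aa in sequence:
--         if aa != '-':
--             i += 1
--         indices.append(i)
--
--     return indices
-- ===== SOURCE B (Python) =====
-- def _bisect_right(a, x):
--     """Rightmost insertion point of x in sorted list a (hand-written binary search)."""
--     lo = 0
--     hi = len(a)
--     while lo < hi:
--         mid = (lo + hi) // 2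
--         if x < a[mid]:
--             hi = mid
--         else:
--             lo = mid + 1
--     return lo
--
-- def seqtoind(sequence):
--     """Index the non-gap positions once; indices[j] is then the rank of j in that
--     sorted position list, answered by binary search (number of residues at <= j)."""
--     residue_pos = [j for j, aa in enumerate(sequence) if aa != '-']
--     return [_bisect_right(residue_pos, j) for j in range(len(sequence))]
-- ===== Notes on version B (the rewrite author's own statement) =====
-- stated objective: alternative
-- what changed: B precomputes the sorted list of non-gap positions and answers each position by a hand-written binary search (rank query: residues at positions <= j), instead of appending a running counter in one interleaved pass.
import Mathlib
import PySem

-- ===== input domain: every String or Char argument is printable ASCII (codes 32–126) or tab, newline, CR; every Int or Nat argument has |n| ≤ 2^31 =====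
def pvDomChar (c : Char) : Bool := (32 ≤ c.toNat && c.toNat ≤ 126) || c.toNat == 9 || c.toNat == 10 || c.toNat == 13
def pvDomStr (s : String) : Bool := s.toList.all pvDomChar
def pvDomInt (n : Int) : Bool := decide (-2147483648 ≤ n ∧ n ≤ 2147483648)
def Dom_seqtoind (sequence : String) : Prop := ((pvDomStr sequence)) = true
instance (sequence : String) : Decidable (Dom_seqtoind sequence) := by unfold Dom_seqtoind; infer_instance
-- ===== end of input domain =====

-- B replaces A's running counter by a sorted index of non-gap positions queried with binary search.

-- ===== PORT A =====
-- for aa in sequence: if aa != '-': i += 1; indices.append(i)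
def seqtoind (sequence : String) : List Int :=
  (sequence.toList.foldl
    (fun (st : List Int × Int) aa =>
      let i := if aa ≠ '-' then st.2 + 1 else st.2
      (st.1 ++ [i], i))
    ([], 0)).1

-- ===== PORT B =====
-- [j for j, aa in enumerate(sequence) if aa != '-'] : the non-gap positions, in order
def residuePositions (k : Int) : List Char → List Int
  | [] => []
  | c :: cs => if c ≠ '-' then k :: residuePositions (k + 1) cs else residuePositions (k + 1) cs

-- hand-written _bisect_right; Python's lo/hi are always nonnegative ints, kept as Nat (exact);
-- a[mid] is always in range at every call reached from seqtoind_alt, so getD's default is never used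
def bisectRightAux (a : List Int) (x : Int) (lo hi : Nat) : Nat :=
  if _h : lo < hi then
    let mid := (lo + hi) / 2
    if x < a.getD mid 0 then bisectRightAux a x lo mid
    else bisectRightAux a x (mid + 1) hi
  else lo
termination_by hi - lo
decreasing_by all_goals omega

-- [_bisect_right(residue_pos, j) for j in range(len(sequence))]
def seqtoind_alt (sequence : String) : List Int :=
  let residuePos := residuePositions 0 sequence.toList
  (PySem.List.pyRange 0 (sequence.toList.length : Int) 1).map
    (fun j => (bisectRightAux residuePos j 0 residuePos.length : Int))

-- ===== PRECONDITION & SPEC =====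
def Spec_seqtoind (sequence : String) (out : List Int) : Prop := out = seqtoind_alt sequence
instance (sequence : String) (out : List Int) : Decidable (Spec_seqtoind sequence out) := by unfold Spec_seqtoind; infer_instance

-- ===== CLAIM (what is proved, stated in full; the proofs are below) =====
def Claim_equal_seqtoind : Prop := ∀ (sequence : String), Dom_seqtoind sequence → Spec_seqtoind sequence (seqtoind sequence)

-- ===== LEMMAS AND PROOFS =====

-- A's loop as an explicit prefix-sum list (proof helper only)
def pvAccum (t : Int) : List Char → List Int
  | [] => []
  | c :: cs =>
    let t' := if c ≠ '-' then t + 1 else t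
    t' :: pvAccum t' cs

theorem seqtoind_fold_eq (l : List Char) (acc : List Int) (t : Int) :
    (l.foldl
      (fun (st : List Int × Int) aa =>
        let i := if aa ≠ '-' then st.2 + 1 else st.2
        (st.1 ++ [i], i))
      (acc, t)).1
    = acc ++ pvAccum t l := by
  induction l generalizing acc t with
  | nil => simp [pvAccum]
  | cons c cs ih =>
    rw [List.foldl_cons]
    refine Eq.trans (ih _ _) ?_
    by_cases h : c = '-' <;> simp [h, pvAccum]

theorem pvAccum_eq_counts (l : List Char) (t : Int) :
    pvAccum t l
    = (List.range l.length).map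
        (fun j => t + ((l.take (j + 1)).countP (fun c => decide (c ≠ '-')) : Int)) := by
  induction l generalizing t with
  | nil => simp [pvAccum]
  | cons c cs ih =>
    rw [pvAccum, List.length_cons, List.range_succ_eq_map, List.map_cons, List.map_map]
    by_cases h : c = '-'
    · rw [show (if c ≠ '-' then t + 1 else t) = t by simp [h], ih]
      congr 1
      · simp [h]
      · apply List.map_congr_left
        intro j _
        simp [h, Function.comp, List.take_succ_cons]
    · rw [show (if c ≠ '-' then t + 1 else t) = t + 1 by simp [h], ih]
      congr 1
      · simp [h]
      · apply List.map_congr_left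
        intro j _
        simp [h, Function.comp, List.take_succ_cons]
        ring

-- every position produced from offset k is ≥ k
theorem rp_ge (l : List Char) : ∀ (k : Int), ∀ p ∈ residuePositions k l, k ≤ p := by
  induction l with
  | nil => intro k p hp; simp [residuePositions] at hp
  | cons c cs ih =>
    intro k p hp
    by_cases h : c = '-' <;> simp [residuePositions, h] at hp
    · have := ih (k + 1) p hp; omega
    · rcases hp with rfl | hp
      · omega
      · have := ih (k + 1) p hp; omega

theorem rp_sorted (l : List Char) : ∀ (k : Int), (residuePositions k l).Pairwise (· ≤ ·) := by
  induction l with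
  | nil => intro k; simp [residuePositions]
  | cons c cs ih =>
    intro k
    by_cases h : c = '-' <;> simp [residuePositions, h]
    · exact ih (k + 1)
    · refine ⟨fun p hp => ?_, ih (k + 1)⟩
      have := rp_ge cs (k + 1) p hp; omega

theorem rp_count (l : List Char) : ∀ (k j : Int),
    (residuePositions k l).countP (fun p => decide (p ≤ j))
    = (l.take (j + 1 - k).toNat).countP (fun c => decide (c ≠ '-')) := by
  induction l with
  | nil => intro k j; simp [residuePositions]
  | cons c cs ih =>
    intro k j
    by_cases hkj : k ≤ j
    · have htn : (j + 1 - k).toNat = (j + 1 - (k + 1)).toNat + 1 := by omega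
      rw [htn, List.take_succ_cons, List.countP_cons]
      by_cases h : c = '-'
      · simp [residuePositions, h, ih (k + 1) j]
      · simp [residuePositions, h, ih (k + 1) j, hkj]
    · have htn : (j + 1 - k).toNat = 0 := by omega
      have htn' : (j + 1 - (k + 1)).toNat = 0 := by omega
      rw [htn, List.take_zero, List.countP_nil]
      by_cases h : c = '-'
      · rw [show residuePositions k (c :: cs) = residuePositions (k+1) cs by simp [residuePositions, h],
          ih (k + 1) j, htn', List.take_zero, List.countP_nil]
      · rw [show residuePositions k (c :: cs) = k :: residuePositions (k+1) cs by simp [residuePositions, h],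
          List.countP_cons, ih (k + 1) j, htn', List.take_zero, List.countP_nil]
        simp [show ¬ (k ≤ j) from hkj]

-- invariant of the binary search: the returned index splits a into (≤ x) / (> x)
theorem bisect_inv (a : List Int) (x : Int) (hs : a.Pairwise (· ≤ ·)) :
    ∀ (n lo hi : Nat), hi - lo ≤ n → lo ≤ hi → hi ≤ a.length →
    (∀ i, i < lo → a.getD i 0 ≤ x) → (∀ i, hi ≤ i → i < a.length → x < a.getD i 0) →
    (∀ i, i < bisectRightAux a x lo hi → a.getD i 0 ≤ x)
    ∧ bisectRightAux a x lo hi ≤ a.length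
    ∧ (∀ i, bisectRightAux a x lo hi ≤ i → i < a.length → x < a.getD i 0) := by
  intro n
  induction n with
  | zero =>
    intro lo hi hn hlh hha h1 h2
    have : lo = hi := by omega
    subst this
    rw [bisectRightAux]
    simp only [lt_irrefl, dite_false]
    exact ⟨h1, by omega, h2⟩
  | succ m ih =>
    intro lo hi hn hlh hha h1 h2
    rw [bisectRightAux]
    by_cases hlt : lo < hi
    · simp only [hlt, dite_true]
      have hmidlt : (lo + hi) / 2 < hi := by omega
      have hmidge : lo ≤ (lo + hi) / 2 := by omega
      have hmidlen : (lo + hi) / 2 < a.length := by omega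
      have hpw := List.pairwise_iff_getElem.mp hs
      by_cases hx : x < a.getD ((lo + hi) / 2) 0
      · simp only [hx, if_true]
        refine ih lo ((lo + hi) / 2) (by omega) (by omega) (by omega) h1 ?_
        intro i hi1 hi2
        rcases eq_or_lt_of_le hi1 with heq | hlt2
        · rw [← heq]; exact hx
        · have hle := hpw ((lo + hi) / 2) i hmidlen hi2 hlt2
          rw [List.getD_eq_getElem a 0 hi2]
          rw [List.getD_eq_getElem a 0 hmidlen] at hx
          exact lt_of_lt_of_le hx hle
      · simp only [hx, if_false]
        refine ih ((lo + hi) / 2 + 1) hi (by omega) (by omega) hha ?_ h2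
        intro i hi1
        have hamid : a.getD ((lo + hi) / 2) 0 ≤ x := by omega
        rcases Nat.lt_succ_iff_lt_or_eq.mp hi1 with hlt2 | heq
        · have hilen : i < a.length := by omega
          have hle := hpw i ((lo + hi) / 2) hilen hmidlen hlt2
          rw [List.getD_eq_getElem a 0 hilen]
          rw [List.getD_eq_getElem a 0 hmidlen] at hamid
          exact le_trans hle hamid
        · rw [heq]; exact hamid
    · simp only [hlt, dite_false]
      obtain rfl : lo = hi := by omega
      exact ⟨h1, by omega, h2⟩

-- a list that is ≤-x on indices < r and >-x from r on has exactly r elements ≤ x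
theorem countP_of_cut (a : List Int) (x : Int) : ∀ (r : Nat), r ≤ a.length →
    (∀ i, i < r → a.getD i 0 ≤ x) → (∀ i, r ≤ i → i < a.length → x < a.getD i 0) →
    a.countP (fun p => decide (p ≤ x)) = r := by
  induction a with
  | nil => intro r hr _ _; simp at hr; simp [hr]
  | cons b bs ih =>
    intro r hr h1 h2
    cases r with
    | zero =>
      have hb : x < b := by simpa using h2 0 (by omega) (by simp)
      rw [List.countP_cons]
      have : bs.countP (fun p => decide (p ≤ x)) = 0 := by
        refine ih 0 (by omega) (by omega) ?_
        intro i _ hlen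
        simpa using h2 (i + 1) (by omega) (by simpa using Nat.succ_lt_succ hlen)
      simp [this, show ¬ (b ≤ x) by omega]
    | succ m =>
      have hb : b ≤ x := by simpa using h1 0 (by omega)
      rw [List.countP_cons]
      have : bs.countP (fun p => decide (p ≤ x)) = m := by
        refine ih m (by simpa using hr) ?_ ?_
        · intro i hi; simpa using h1 (i + 1) (by omega)
        · intro i hi hlen; simpa using h2 (i + 1) (by omega) (by simpa using Nat.succ_lt_succ hlen)
      simp [this, hb]

theorem bisect_eq_countP (a : List Int) (x : Int) (hs : a.Pairwise (· ≤ ·)) :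
    bisectRightAux a x 0 a.length = a.countP (fun p => decide (p ≤ x)) := by
  obtain ⟨h1, h2, h3⟩ := bisect_inv a x hs a.length 0 a.length (by omega) (by omega) le_rfl
    (by omega) (by omega)
  exact (countP_of_cut a x _ h2 h1 h3).symm

-- ===== VERDICT (by name: the statement is the Claim_ definition above) =====
theorem seqtoind_spec : Claim_equal_seqtoind := by
  intro s _
  unfold Spec_seqtoind seqtoind seqtoind_alt
  rw [seqtoind_fold_eq s.toList [] 0, List.nil_append, pvAccum_eq_counts]
  rw [PySem.List.pyRange_one]
  simp only [Int.sub_zero, Int.toNat_natCast, List.map_map]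
  apply List.map_congr_left
  intro j hj
  rw [List.mem_range] at hj
  simp only [Function.comp]
  rw [show ((0 : Int) + (j : Int)) = (j : Int) by ring]
  rw [bisect_eq_countP _ _ (rp_sorted s.toList 0), rp_count s.toList 0 (j : Int)]
  have : ((j : Int) + 1 - 0).toNat = j + 1 := by omega
  rw [this]
  ring
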